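-- pv_equiv track=rewrite | github.com/RishabhMaheshwary/mindgames | src/simulation_utils.py | _prioritize_non_pass
-- ===== SOURCE A (Python) =====
-- def _prioritize_non_pass(actions, tag_name):
--     # Put explicit 'pass' (exact or bracketed) to the end
--     pass_like = []
--     non_pass = []
--     for a in actions:
--         a_clean = a.strip().lower()
--         is_pass = (a_clean == "pass") or (a_clean == f"<{tag_name}>pass</{tag_name}>") or ("pass" == a_clean)
--         (pass_like if is_pass else non_pass).append(a)
--     return non_pass + pass_like
-- ===== SOURCE B (Python) =====
-- def _prioritize_non_pass(actions, tag_name):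
--     # Stable sort by a boolean key: non-pass (False) keep order in front, pass-like (True) go to the end
--     def is_pass(a):
--         a_clean = a.strip().lower()
--         return a_clean == "pass" or a_clean == f"<{tag_name}>pass</{tag_name}>"
--     return sorted(actions, key=is_pass)
-- ===== Notes on version B (the rewrite author's own statement) =====
-- stated objective: idiomatic
-- what changed: Replaces the two accumulator lists and final concatenation with a single stable sort by a boolean is_pass key (and drops the redundant duplicated 'pass' comparison), relying on sort stability for the order.
import Mathlib
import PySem

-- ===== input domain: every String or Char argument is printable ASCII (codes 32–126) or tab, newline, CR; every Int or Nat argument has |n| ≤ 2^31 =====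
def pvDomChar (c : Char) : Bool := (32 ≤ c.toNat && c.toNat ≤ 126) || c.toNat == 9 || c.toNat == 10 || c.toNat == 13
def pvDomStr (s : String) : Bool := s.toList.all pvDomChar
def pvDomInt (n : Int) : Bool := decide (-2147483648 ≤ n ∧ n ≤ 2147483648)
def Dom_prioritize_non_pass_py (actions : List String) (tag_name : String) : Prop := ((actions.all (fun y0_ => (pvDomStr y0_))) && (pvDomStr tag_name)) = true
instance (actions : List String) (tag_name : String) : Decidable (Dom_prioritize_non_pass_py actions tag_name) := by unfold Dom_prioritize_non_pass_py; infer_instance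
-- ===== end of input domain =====

-- B replaces A's two accumulator lists and final concatenation by one stable sort with a boolean is_pass key (idiomatic; not faster).

-- ===== PORT A =====
-- f"<{tag_name}>pass</{tag_name}>" as a list of characters (exact: ASCII literal pieces around the tag)
def pvTagPass (tag_name : String) : List Char :=
  '<' :: tag_name.toList ++ '>' :: 'p' :: 'a' :: 's' :: 's' :: '<' :: '/' :: tag_name.toList ++ ['>']

def prioritize_non_pass_py (actions : List String) (tag_name : String) : List String :=
  -- state = (pass_like, non_pass); strings handled as List Char via PySem.Chars (exact on the domain)
  let st := actions.foldl
    (fun (st : List String × List String) a =>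
      let a_clean := PySem.Chars.lower (PySem.Chars.strip a.toList)
      let is_pass := (a_clean == ['p','a','s','s']) || (a_clean == pvTagPass tag_name)
                       || (['p','a','s','s'] == a_clean)
      if is_pass then (st.1 ++ [a], st.2) else (st.1, st.2 ++ [a]))
    ([], [])
  st.2 ++ st.1

-- ===== PORT B =====
def pvIsPass (tag_name : String) (a : String) : Bool :=
  let a_clean := PySem.Chars.lower (PySem.Chars.strip a.toList)
  (a_clean == ['p','a','s','s']) || (a_clean == pvTagPass tag_name)

def prioritize_non_pass_py_alt (actions : List String) (tag_name : String) : List String :=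
  PySem.List.sorted actions (pvIsPass tag_name) false

-- ===== PRECONDITION & SPEC =====
def Spec_prioritize_non_pass_py (actions : List String) (tag_name : String) (out : List String) : Prop := out = prioritize_non_pass_py_alt actions tag_name
instance (actions : List String) (tag_name : String) (out : List String) : Decidable (Spec_prioritize_non_pass_py actions tag_name out) := by unfold Spec_prioritize_non_pass_py; infer_instance

-- ===== CLAIM (what is proved, stated in full; the proofs are below) =====
def Claim_equal_prioritize_non_pass_py : Prop := ∀ (actions : List String) (tag_name : String), Dom_prioritize_non_pass_py actions tag_name → Spec_prioritize_non_pass_py actions tag_name (prioritize_non_pass_py actions tag_name)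

-- ===== LEMMAS AND PROOFS =====

-- inserting x into an all-"not before" block followed by an all-"before" block lands exactly between them
theorem pv_insertBy_split {α : Type} (before : α → α → Bool) (x : α) (F T : List α)
    (hF : ∀ y ∈ F, before x y = false) (hT : ∀ y ∈ T, before x y = true) :
    PySem.List.insertBy before x (F ++ T) = F ++ x :: T := by
  induction F with
  | nil =>
    cases T with
    | nil => rfl
    | cons y ys => simp [PySem.List.insertBy, hT y (List.mem_cons_self)]
  | cons y F ih =>
    simp only [List.cons_append, PySem.List.insertBy, hF y (List.mem_cons_self)]
    simp [ih (fun z hz => hF z (List.mem_cons_of_mem y hz))]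

-- invariant of the insertion-sort fold with a Bool-valued key: the accumulator stays a
-- false-key block followed by a true-key block, each extended in input order
theorem pv_foldl_insert_bool (key : String → Bool) :
    ∀ (xs F T : List String), (∀ y ∈ F, key y = false) → (∀ y ∈ T, key y = true) →
    xs.foldl (fun acc x => PySem.List.insertBy (fun a b => decide (key a < key b)) x acc) (F ++ T)
      = (F ++ xs.filter (fun a => !key a)) ++ (T ++ xs.filter key) := by
  intro xs
  induction xs with
  | nil => intro F T _ _; simp
  | cons x xs ih =>
    intro F T hF hT
    simp only [List.foldl_cons]
    cases hx : key x with
    | false =>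
      have h1 : PySem.List.insertBy (fun a b => decide (key a < key b)) x (F ++ T) = F ++ x :: T := by
        apply pv_insertBy_split
        · intro y hy; simp [hx, hF y hy]
        · intro y hy; simp [hx, hT y hy]
      have h2 : F ++ x :: T = (F ++ [x]) ++ T := by simp
      rw [h1, h2, ih (F ++ [x]) T (by intro y hy; rcases List.mem_append.mp hy with h | h
                                      · exact hF y h
                                      · simp at h; subst h; exact hx) hT]
      simp [hx, List.append_assoc]
    | true =>
      have h1 : PySem.List.insertBy (fun a b => decide (key a < key b)) x (F ++ T) = (F ++ T) ++ [x] := by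
        apply PySem.List.insertBy_of_forall_not_before
        intro y _; cases hy : key y <;> simp [hx, hy]
      have h2 : (F ++ T) ++ [x] = F ++ (T ++ [x]) := by simp
      rw [h1, h2, ih F (T ++ [x]) hF (by intro y hy; rcases List.mem_append.mp hy with h | h
                                         · exact hT y h
                                         · simp at h; subst h; exact hx)]
      simp [hx, List.append_assoc]

-- B is the stable partition: non-pass first, then pass-like, each in input order
theorem pv_B_eq (actions : List String) (tag_name : String) :
    prioritize_non_pass_py_alt actions tag_name
      = actions.filter (fun a => !pvIsPass tag_name a) ++ actions.filter (pvIsPass tag_name) := by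
  unfold prioritize_non_pass_py_alt
  rw [PySem.List.sorted_eq_foldl_insertBy]
  simpa using pv_foldl_insert_bool (pvIsPass tag_name) actions [] [] (by simp) (by simp)

-- A's loop with the (pointwise equal) two-disjunct test: the pair accumulates the two filters
theorem pv_A_loop_clean (tag_name : String) :
    ∀ (xs p q : List String),
    xs.foldl (fun (st : List String × List String) a =>
        if pvIsPass tag_name a then (st.1 ++ [a], st.2) else (st.1, st.2 ++ [a])) (p, q)
      = (p ++ xs.filter (pvIsPass tag_name), q ++ xs.filter (fun a => !pvIsPass tag_name a)) := by
  intro xs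
  induction xs with
  | nil => intro p q; simp
  | cons x xs ih =>
    intro p q
    rw [List.foldl_cons]
    cases hx : pvIsPass tag_name x
    · rw [if_neg (by simp)]
      rw [ih p (q ++ [x])]
      simp [hx]
    · rw [if_pos rfl]
      rw [ih (p ++ [x]) q]
      simp [hx]

-- A's step function IS the clean one: its third disjunct repeats the first (== is symmetric)
theorem pv_A_step_eq (tag_name : String) :
    (fun (st : List String × List String) a =>
      let a_clean := PySem.Chars.lower (PySem.Chars.strip a.toList)
      let is_pass := (a_clean == ['p','a','s','s']) || (a_clean == pvTagPass tag_name)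
                       || (['p','a','s','s'] == a_clean)
      if is_pass then (st.1 ++ [a], st.2) else (st.1, st.2 ++ [a]))
    = (fun (st : List String × List String) a =>
        if pvIsPass tag_name a then (st.1 ++ [a], st.2) else (st.1, st.2 ++ [a])) := by
  funext st a
  have hcond : ((PySem.Chars.lower (PySem.Chars.strip a.toList) == ['p','a','s','s'])
      || (PySem.Chars.lower (PySem.Chars.strip a.toList) == pvTagPass tag_name)
      || (['p','a','s','s'] == PySem.Chars.lower (PySem.Chars.strip a.toList)))
      = pvIsPass tag_name a := by
    cases h : (PySem.Chars.lower (PySem.Chars.strip a.toList) == ['p','a','s','s']) <;>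
      simp [pvIsPass, h, Bool.beq_comm (a := (['p','a','s','s'] : List Char))]
  simp only [hcond]

-- ===== VERDICT (by name: the statement is the Claim_ definition above) =====
theorem prioritize_non_pass_py_spec : Claim_equal_prioritize_non_pass_py := by
  intro actions tag_name _
  unfold Spec_prioritize_non_pass_py prioritize_non_pass_py
  rw [pv_B_eq]
  show (List.foldl _ ([], []) actions).2 ++ (List.foldl _ ([], []) actions).1 = _
  rw [pv_A_step_eq tag_name, pv_A_loop_clean tag_name actions [] []]
  simp
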